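-- pv_equiv track=rewrite | github.com/kodendaal/bd4h_mnet | segcompare.py | _expand_braces
-- ===== SOURCE A (Python) =====
-- from typing import Dict, List, Tuple, Optional
--
-- def _expand_braces(pattern: str) -> List[str]:
--     if "{" not in pattern: return [pattern]
--     pre = pattern[:pattern.index("{")]
--     rest = pattern[pattern.index("{")+1:]
--     opts = rest[:rest.index("}")].split(",")
--     post = rest[rest.index("}")+1:]
--     out = []
--     for o in opts:
--         out.extend(_expand_braces(pre + o + post))
--     return out
-- ===== SOURCE B (Python) =====
-- def _expand_braces(pattern: str):
--     # In-place rewriting to a fixpoint: keep a single list and repeatedly splice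
--     # the first still-braced element's expansions back into its position.
--     out = [pattern]
--     while True:
--         hit = None
--         for k, p in enumerate(out):
--             if "{" in p:
--                 hit = k
--                 break
--         if hit is None:
--             return out
--         p = out[hit]
--         i = p.index("{")
--         pre, rest = p[:i], p[i + 1:]
--         j = rest.index("}")
--         opts = rest[:j].split(",")
--         post = rest[j + 1:]
--         out[hit:hit + 1] = [pre + o + post for o in opts]
-- ===== Notes on version B (the rewrite author's own statement) =====
-- stated objective: alternative
-- what changed: A's recursion is replaced by in-place fixpoint rewriting: one list holds the work, and each iteration splices the expansions of the first still-braced element back into its position until no element contains a brace; same output order, no Python recursion.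
-- outside the precondition, e.g. on _expand_braces('{a'): A raises ValueError, B raises ValueError; on _expand_braces('{a{b}c}'): A returns ['abc'], B returns ['abc']
import Mathlib
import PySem

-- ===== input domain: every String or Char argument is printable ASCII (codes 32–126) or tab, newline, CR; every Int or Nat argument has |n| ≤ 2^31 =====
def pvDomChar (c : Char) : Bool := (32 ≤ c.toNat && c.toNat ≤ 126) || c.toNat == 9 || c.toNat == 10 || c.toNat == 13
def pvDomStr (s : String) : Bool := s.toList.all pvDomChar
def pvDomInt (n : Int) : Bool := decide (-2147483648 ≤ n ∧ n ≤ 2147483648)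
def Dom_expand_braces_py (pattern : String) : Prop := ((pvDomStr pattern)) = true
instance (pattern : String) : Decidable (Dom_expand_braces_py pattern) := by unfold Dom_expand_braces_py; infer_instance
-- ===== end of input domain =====

-- B replaces A's recursion by in-place rewriting to a fixpoint: one worklist holds the
-- partial result, and each round splices the expansions of the FIRST still-braced element
-- back into its position until no element has a brace; alternative decomposition, same
-- output.  Return values proved equal on Pre_; Pre_ excludes the inputs where A raises.

-- ===== PORT A =====
-- A's recursion is not structural; the Nat fuel is only a totality guard: every
-- recursive call is on a string at least 2 characters shorter (a '{' and a '}'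
-- are removed), so fuel = length + 1 is never exhausted (pvExpandA_fuel below).
-- Python's one-character substring test/search '"{" in p' / 'p.index("{")' is
-- ported as PySem.List.index? on the character list (exact: first occurrence;
-- none = not contained = ValueError for .index, the branch Pre_ excludes).
def pvExpandA : Nat → List Char → List (List Char)
  | 0, _ => []
  | fuel + 1, p =>
    match PySem.List.index? p '{' with
    | none => [p]                               -- if "{" not in pattern: return [pattern]
    | some i =>
      let pre := p.take i                       -- pattern[:pattern.index("{")]
      let rest := p.drop (i + 1)                -- pattern[pattern.index("{")+1:]
      match PySem.List.index? rest '}' with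
      | none => []                              -- rest.index("}") raises ValueError (outside Pre_)
      | some j =>
        let opts := PySem.Chars.splitOn (rest.take j) [',']   -- rest[:rest.index("}")].split(",")
        let post := rest.drop (j + 1)                         -- rest[rest.index("}")+1:]
        -- out = []; for o in opts: out.extend(_expand_braces(pre + o + post))
        opts.foldl (fun out o => out ++ pvExpandA fuel (pre ++ o ++ post)) []

def expand_braces_py (pattern : String) : List String :=
  (pvExpandA (pattern.toList.length + 1) pattern.toList).map String.ofList

-- ===== PORT B =====
-- the 'for k, p in enumerate(out): if "{" in p: hit = k; break' scan: returns the
-- already-scanned brace-free prefix, the first braced element with its brace index,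
-- and the unscanned suffix — or none when no element contains a '{' (hit is None).
def pvFindB : List (List Char) → List (List Char) →
    Option (List (List Char) × Nat × List Char × List (List Char))
  | _, [] => none
  | seen, p :: t =>
    match PySem.List.index? p '{' with
    | some i => some (seen, i, p, t)
    | none => pvFindB (seen ++ [p]) t

-- the 'while True' rewriting loop; 'out[hit:hit+1] = [pre+o+post for o in opts]' is the
-- splice seen ++ replacements ++ t.  The Nat fuel is only a totality guard: the sum of
-- (len+2)! over the list strictly drops each round (pvLoopB_eq below).  When rest has
-- no '}' Python raises ValueError (outside Pre_); this port drops that element instead.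
def pvLoopB : Nat → List (List Char) → List (List Char)
  | 0, out => out                               -- fuel guard, never reached
  | fuel + 1, out =>
    match pvFindB [] out with
    | none => out                               -- hit is None: return out
    | some (seen, i, p, t) =>
      let pre := p.take i                       -- p[:i]
      let rest := p.drop (i + 1)                -- p[i+1:]
      match PySem.List.index? rest '}' with
      | none => pvLoopB fuel (seen ++ t)        -- rest.index("}") raises (outside Pre_)
      | some j =>
        let opts := PySem.Chars.splitOn (rest.take j) [',']   -- rest[:j].split(",")
        let post := rest.drop (j + 1)                         -- rest[j+1:]
        pvLoopB fuel (seen ++ opts.map (fun o => pre ++ o ++ post) ++ t)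

def expand_braces_py_alt (pattern : String) : List String :=
  (pvLoopB (pattern.toList.length + 2).factorial [pattern.toList]).map String.ofList

-- ===== PRECONDITION & SPEC =====
-- Pre_ excludes exactly this: inputs on which Python's _expand_braces raises
-- ValueError (some expansion step meets a '{' with no later '}').  The scan
-- accepts strings whose braces are flat and closed — every '{' is followed by a
-- '}' with no further '{' in between ('}' is free elsewhere); A returns normally
-- on every such string (it also returns on some nested ones outside Pre_).
def pvBraceScan : List Char → Bool → Bool
  | [], opened => !opened
  | c :: t, false => if c = '{' then pvBraceScan t true else pvBraceScan t false
  | c :: t, true => if c = '}' then pvBraceScan t false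
                    else if c = '{' then false else pvBraceScan t true

def Pre_expand_braces_py (pattern : String) : Prop :=
  pvBraceScan pattern.toList false = true
instance (pattern : String) : Decidable (Pre_expand_braces_py pattern) := by
  unfold Pre_expand_braces_py; infer_instance

def pvWitness_expand_braces_py : String := "ab{c,de}-{f,}g"

def Spec_expand_braces_py (pattern : String) (out : List String) : Prop := out = expand_braces_py_alt pattern
instance (pattern : String) (out : List String) : Decidable (Spec_expand_braces_py pattern out) := by unfold Spec_expand_braces_py; infer_instance

-- ===== CLAIM (what is proved, stated in full; the proofs are below) =====
def Claim_equal_expand_braces_py : Prop := ∀ (pattern : String), Dom_expand_braces_py pattern → Pre_expand_braces_py pattern → Spec_expand_braces_py pattern (expand_braces_py pattern)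

-- ===== LEMMAS AND PROOFS =====

-- every piece produced by split is at most as long as the split string
lemma pvSplitGo_len (sep : List Char) : ∀ (fuel : Nat) (l cur : List Char)
    (acc : List (List Char)) (part : List Char),
    part ∈ PySem.Chars.splitOn.go sep fuel l cur acc →
    part ∈ acc ∨ part.length ≤ cur.length + l.length := by
  intro fuel
  induction fuel with
  | zero =>
    intro l cur acc part h
    simp [PySem.Chars.splitOn.go] at h
    rcases h with h | h
    · left; exact h
    · right; simp [h]
  | succ f ih =>
    intro l cur acc part h
    cases l with
    | nil =>
      simp [PySem.Chars.splitOn.go] at h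
      rcases h with h | h
      · left; exact h
      · right; simp [h]
    | cons c rest =>
      rw [PySem.Chars.splitOn.go] at h
      split at h
      · rcases ih _ _ _ _ h with h' | h'
        · rcases List.mem_cons.mp h' with h'' | h''
          · right; simp [h'']
          · left; exact h''
        · right; simp at h' ⊢; omega
      · rcases ih _ _ _ _ h with h' | h'
        · left; exact h'
        · right; simp at h' ⊢; omega

lemma pvSplitGo_count (sep : List Char) (hsep : sep ≠ []) :
    ∀ (fuel : Nat) (l cur : List Char) (acc : List (List Char)),
    (PySem.Chars.splitOn.go sep fuel l cur acc).length ≤ acc.length + 1 + l.length := by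
  intro fuel
  induction fuel with
  | zero => intro l cur acc; simp [PySem.Chars.splitOn.go]
  | succ f ih =>
    intro l cur acc
    cases l with
    | nil => simp [PySem.Chars.splitOn.go]
    | cons c rest =>
      rw [PySem.Chars.splitOn.go]
      split
      · have := ih (List.drop sep.length (c :: rest)) [] (cur.reverse :: acc)
        have hs : 1 ≤ sep.length := by cases sep <;> simp_all
        simp at this ⊢
        omega
      · have := ih rest (c :: cur) acc
        simp at this ⊢; omega

lemma pvSplitOn_part_len (l : List Char) (part : List Char)
    (h : part ∈ PySem.Chars.splitOn l [',']) : part.length ≤ l.length := by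
  have := pvSplitGo_len [','] (l.length + 1) l [] [] part h
  simpa using this

lemma pvSplitOn_count (l : List Char) :
    (PySem.Chars.splitOn l [',']).length ≤ l.length + 1 := by
  have := pvSplitGo_count [','] (by simp) (l.length + 1) l [] []
  simp only [PySem.Chars.splitOn]
  simp at this
  omega

-- geometry of the braced branch: the replacement string is ≥ 2 characters shorter
lemma pvSub_len {p : List Char} {i j : Nat}
    (h1 : PySem.List.index? p '{' = some i)
    (h2 : PySem.List.index? (p.drop (i + 1)) '}' = some j)
    {o : List Char}
    (ho : o ∈ PySem.Chars.splitOn ((p.drop (i + 1)).take j) [',']) :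
    (p.take i ++ o ++ (p.drop (i + 1)).drop (j + 1)).length + 2 ≤ p.length := by
  obtain ⟨hi, -, -⟩ := PySem.List.getElem_of_index?_eq_some h1
  obtain ⟨hj, -, -⟩ := PySem.List.getElem_of_index?_eq_some h2
  have hol := pvSplitOn_part_len _ _ ho
  simp at hj hol ⊢
  omega

lemma pvTwo_le {p : List Char} {i j : Nat}
    (h1 : PySem.List.index? p '{' = some i)
    (h2 : PySem.List.index? (p.drop (i + 1)) '}' = some j) : 2 ≤ p.length := by
  obtain ⟨hi, -, -⟩ := PySem.List.getElem_of_index?_eq_some h1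
  obtain ⟨hj, -, -⟩ := PySem.List.getElem_of_index?_eq_some h2
  simp at hj
  omega

-- the braced step of A, as an equation
lemma pvExpandA_step (fuel : Nat) {p : List Char} {i j : Nat}
    (h1 : PySem.List.index? p '{' = some i)
    (h2 : PySem.List.index? (p.drop (i + 1)) '}' = some j) :
    pvExpandA (fuel + 1) p
      = (PySem.Chars.splitOn ((p.drop (i + 1)).take j) [',']).foldl
          (fun out o => out ++ pvExpandA fuel (p.take i ++ o ++ (p.drop (i + 1)).drop (j + 1))) [] := by
  simp only [pvExpandA, h1, h2]

-- fuel irrelevance for the A-side recursion: any fuel > length computes the result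
lemma pvExpandA_fuel : ∀ (f1 f2 : Nat) (p : List Char),
    p.length < f1 → p.length < f2 → pvExpandA f1 p = pvExpandA f2 p := by
  intro f1
  induction f1 with
  | zero => omega
  | succ a ih =>
    intro f2 p hp1 hp2
    cases f2 with
    | zero => omega
    | succ b =>
      cases h1 : PySem.List.index? p '{' with
      | none => simp only [pvExpandA, h1]
      | some i =>
        cases h2 : PySem.List.index? (p.drop (i + 1)) '}' with
        | none => simp only [pvExpandA, h1, h2]
        | some j =>
          simp only [pvExpandA, h1, h2]
          refine PySem.List.foldl_congr_mem _ _ _ _ ?_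
          intro acc o ho
          have hlen := pvSub_len h1 h2 ho
          have h2le := pvTwo_le h1 h2
          rw [ih b _ (by omega) (by omega)]

-- A's semantics of one entry, with the canonical fuel
def pvE (p : List Char) : List (List Char) := pvExpandA (p.length + 1) p

-- the braced step of A, through pvE and flatten
lemma pvE_step {p : List Char} {i j : Nat}
    (h1 : PySem.List.index? p '{' = some i)
    (h2 : PySem.List.index? (p.drop (i + 1)) '}' = some j) :
    pvE p = (((PySem.Chars.splitOn ((p.drop (i + 1)).take j) [',']).map
        (fun o => p.take i ++ o ++ (p.drop (i + 1)).drop (j + 1))).map pvE).flatten := by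
  unfold pvE
  rw [show p.length + 1 = p.length + 1 from rfl]
  cases hl : p.length with
  | zero =>
    obtain ⟨hi, -, -⟩ := PySem.List.getElem_of_index?_eq_some h1
    omega
  | succ n =>
    rw [← hl]
    rw [pvExpandA_step p.length h1 h2,
      PySem.List.foldl_append_eq_flatMap, List.flatMap_def, List.map_map]
    simp only [List.nil_append]
    congr 1
    apply List.map_congr_left
    intro o ho
    simp only [Function.comp]
    have hlen := pvSub_len h1 h2 ho
    have h2le := pvTwo_le h1 h2
    apply pvExpandA_fuel <;> omega

-- iteration weight of a list entry
def pvMu (p : List Char) : Nat := (p.length + 2).factorial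

lemma pvNews_mu {p : List Char} {i j : Nat}
    (h1 : PySem.List.index? p '{' = some i)
    (h2 : PySem.List.index? (p.drop (i + 1)) '}' = some j) :
    ((((PySem.Chars.splitOn ((p.drop (i + 1)).take j) [',']).map
        (fun o => p.take i ++ o ++ (p.drop (i + 1)).drop (j + 1))).map pvMu).sum) + 1
      ≤ pvMu p := by
  set opts := PySem.Chars.splitOn ((p.drop (i + 1)).take j) [','] with hopts
  have hbound : ∀ x ∈ (opts.map (fun o => p.take i ++ o ++ (p.drop (i + 1)).drop (j + 1))).map pvMu,
      x ≤ p.length.factorial := by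
    intro x hx
    simp only [List.mem_map] at hx
    obtain ⟨q, hq, rfl⟩ := hx
    obtain ⟨o, ho, rfl⟩ := hq
    have := pvSub_len h1 h2 ho
    exact Nat.factorial_le (by omega)
  have hsum := List.sum_le_card_nsmul _ _ hbound
  have hcount : opts.length ≤ p.length - 1 := by
    have hc := pvSplitOn_count ((p.drop (i + 1)).take j)
    rw [← hopts] at hc
    obtain ⟨hi, -, -⟩ := PySem.List.getElem_of_index?_eq_some h1
    obtain ⟨hj, -, -⟩ := PySem.List.getElem_of_index?_eq_some h2
    simp at hj hc
    omega
  have hlenmap : ((opts.map (fun o => p.take i ++ o ++ (p.drop (i + 1)).drop (j + 1))).map pvMu).length = opts.length := by simp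
  have h2le := pvTwo_le h1 h2
  have hF : 0 < p.length.factorial := Nat.factorial_pos _
  have hmu : pvMu p = (p.length + 2) * ((p.length + 1) * p.length.factorial) := by
    simp [pvMu, Nat.factorial_succ]
  have : opts.length * p.length.factorial + 1 ≤ (p.length + 2) * ((p.length + 1) * p.length.factorial) := by
    have hstep : opts.length * p.length.factorial + 1 ≤ p.length * p.length.factorial := by
      have h1' : opts.length * p.length.factorial ≤ (p.length - 1) * p.length.factorial :=
        Nat.mul_le_mul_right _ hcount
      have : (p.length - 1) * p.length.factorial + p.length.factorial ≤ p.length * p.length.factorial := by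
        have : (p.length - 1) + 1 ≤ p.length := by omega
        calc (p.length - 1) * p.length.factorial + p.length.factorial
            = ((p.length - 1) + 1) * p.length.factorial := by ring
          _ ≤ p.length * p.length.factorial := Nat.mul_le_mul_right _ this
      omega
    have : p.length * p.length.factorial ≤ (p.length + 2) * ((p.length + 1) * p.length.factorial) := by
      have := Nat.mul_le_mul_right (p.length.factorial) (show p.length ≤ (p.length+2)*(p.length+1) by nlinarith)
      calc p.length * p.length.factorial ≤ ((p.length+2)*(p.length+1)) * p.length.factorial := this
        _ = (p.length + 2) * ((p.length + 1) * p.length.factorial) := by ring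
    omega
  rw [hmu]
  simp only [smul_eq_mul] at hsum
  rw [hlenmap] at hsum
  omega

-- the scan: a hit splits the list in place; no hit means every entry is brace-free
lemma pvFindB_some : ∀ (xs seen seen' : List (List Char)) (i : Nat) (p : List Char)
    (t : List (List Char)), pvFindB seen xs = some (seen', i, p, t) →
    seen' ++ p :: t = seen ++ xs ∧ PySem.List.index? p '{' = some i := by
  intro xs
  induction xs with
  | nil => intro seen seen' i p t h; simp [pvFindB] at h
  | cons q rest ih =>
    intro seen seen' i p t h
    rw [pvFindB] at h
    cases hq : PySem.List.index? q '{' with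
    | some k =>
      rw [hq] at h
      simp at h
      obtain ⟨rfl, rfl, rfl, rfl⟩ := h
      exact ⟨rfl, hq⟩
    | none =>
      rw [hq] at h
      obtain ⟨h1, h2⟩ := ih _ _ _ _ _ h
      refine ⟨?_, h2⟩
      rw [h1]; simp

lemma pvFindB_none : ∀ (xs seen : List (List Char)), pvFindB seen xs = none →
    ∀ p ∈ xs, PySem.List.index? p '{' = none := by
  intro xs
  induction xs with
  | nil => intro seen _ p hp; simp at hp
  | cons q rest ih =>
    intro seen h p hp
    rw [pvFindB] at h
    cases hq : PySem.List.index? q '{' with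
    | some k => rw [hq] at h; simp at h
    | none =>
      rw [hq] at h
      rcases List.mem_cons.mp hp with rfl | hp'
      · exact hq
      · exact ih _ h p hp'

-- at the fixpoint every entry is brace-free and is its own expansion
lemma pvFlatten_of_free : ∀ (xs : List (List Char)),
    (∀ p ∈ xs, PySem.List.index? p '{' = none) → (xs.map pvE).flatten = xs := by
  intro xs
  induction xs with
  | nil => intro _; simp
  | cons q rest ih =>
    intro hall
    have hq := hall q (by simp)
    have hEq : pvE q = [q] := by simp only [pvE, pvExpandA, hq]
    simp only [List.map_cons, List.flatten_cons, hEq]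
    rw [ih (fun p hp => hall p (List.mem_cons_of_mem _ hp))]
    rfl

-- the loop invariant: with enough fuel, the fixpoint of the rewriting loop is
-- exactly the concatenation of A's expansions of the entries, in order
lemma pvLoopB_eq : ∀ (fuel : Nat) (xs : List (List Char)),
    (xs.map pvMu).sum ≤ fuel → pvLoopB fuel xs = (xs.map pvE).flatten := by
  intro fuel
  induction fuel with
  | zero =>
    intro xs h
    cases xs with
    | nil => simp [pvLoopB]
    | cons p st' =>
      exfalso
      have := Nat.factorial_pos (p.length + 2)
      simp [pvMu] at h
      omega
  | succ f ih =>
    intro xs h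
    cases hf : pvFindB [] xs with
    | none =>
      simp only [pvLoopB, hf]
      exact (pvFlatten_of_free xs (pvFindB_none xs [] hf)).symm
    | some r =>
      obtain ⟨seen, i, p, t⟩ := r
      obtain ⟨hsplit, h1⟩ := pvFindB_some xs [] seen i p t hf
      simp only [List.nil_append] at hsplit
      subst hsplit
      have hmup : 0 < pvMu p := Nat.factorial_pos _
      simp only [List.map_append, List.map_cons, List.sum_append, List.sum_cons] at h
      cases h2 : PySem.List.index? (p.drop (i + 1)) '}' with
      | none =>
        simp only [pvLoopB, hf, h2]
        rw [ih (seen ++ t) (by simp only [List.map_append, List.sum_append]; omega)]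
        have hEp : pvE p = [] := by simp only [pvE, pvExpandA, h1, h2]
        simp [hEp]
      | some j =>
        simp only [pvLoopB, hf, h2]
        have hnews := pvNews_mu h1 h2
        rw [ih _ (by simp only [List.map_append, List.sum_append]; omega)]
        simp only [List.map_append, List.map_cons, List.flatten_append, List.flatten_cons]
        rw [pvE_step h1 h2]
        simp [List.map_map]

-- ===== VERDICT (by name: the statement is the Claim_ definition above) =====
theorem expand_braces_py_spec : Claim_equal_expand_braces_py := by
  intro pattern _ _
  unfold Spec_expand_braces_py expand_braces_py expand_braces_py_alt
  rw [pvLoopB_eq _ _ (by simp [pvMu])]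
  simp [pvE]
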